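-- pv_equiv track=rewrite | github.com/grpc/grpc | examples/python/cancellation/server.py | _get_substring_hamming_distance
-- ===== SOURCE A (Python) =====
-- def _get_hamming_distance(a, b):
--     """Calculates hamming distance between strings of equal length."""
--     assert len(a) == len(b), "'{}', '{}'".format(a, b)
--     distance = 0
--     for char_a, char_b in zip(a, b):
--         if char_a.lower() != char_b.lower():
--             distance += 1
--     return distance
--
-- def _get_substring_hamming_distance(candidate, target):
--     """Calculates the minimum hamming distance between between the target
--         and any substring of the candidate.
--
--     Args:
--       candidate: The string whose substrings will be tested.
--       target: The target string.
--
--     Returns: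
--       The minimum Hamming distance between candidate and target.
--     """
--     assert len(target) <= len(candidate)
--     assert len(candidate) != 0
--     min_distance = None
--     for i in range(len(candidate) - len(target) + 1):
--         distance = _get_hamming_distance(candidate[i:i + len(target)], target)
--         if min_distance is None or distance < min_distance:
--             min_distance = distance
--     return min_distance
-- ===== SOURCE B (Python) =====
-- def _get_substring_hamming_distance(candidate, target):
--     assert len(target) <= len(candidate)
--     assert len(candidate) != 0
--     num_windows = len(candidate) - len(target) + 1
--     distances = [0] * num_windows
--     for k in range(len(target)):
--         tk = target[k].lower()
--         distances = [d + (1 if candidate[i + k].lower() != tk else 0)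
--                      for i, d in enumerate(distances)]
--     return min(distances)
-- ===== Notes on version B (the rewrite author's own statement) =====
-- stated objective: alternative
-- what changed: Instead of recomputing a fresh hamming distance for each window via slicing and zip, B transposes the loops: it maintains a distances table with one entry per window, adds each target position's mismatch indicator to every window's entry in a single pass per position, and returns the table's minimum.
import Mathlib
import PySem

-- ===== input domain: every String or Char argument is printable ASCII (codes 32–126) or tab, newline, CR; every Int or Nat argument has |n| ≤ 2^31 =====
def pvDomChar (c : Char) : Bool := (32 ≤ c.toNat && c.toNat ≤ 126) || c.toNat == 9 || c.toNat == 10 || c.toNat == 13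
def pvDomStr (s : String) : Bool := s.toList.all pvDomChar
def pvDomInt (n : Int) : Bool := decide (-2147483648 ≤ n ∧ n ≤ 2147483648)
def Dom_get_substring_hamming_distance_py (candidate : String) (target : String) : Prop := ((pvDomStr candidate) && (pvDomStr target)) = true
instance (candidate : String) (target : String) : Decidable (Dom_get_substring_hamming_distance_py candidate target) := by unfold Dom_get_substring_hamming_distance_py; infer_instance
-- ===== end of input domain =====

-- B replaces A's per-window slice-and-zip hamming computation by a transposed pass that
-- maintains a per-window distances table, one update sweep per target position. (return value only)

-- ===== PORT A =====
-- helper _get_hamming_distance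
def hamming_py (a b : List Char) : Int :=
  (a.zip b).foldl
    (fun d p => if PySem.Chars.lower [p.1] ≠ PySem.Chars.lower [p.2] then d + 1 else d) 0

def get_substring_hamming_distance_py (candidate : String) (target : String) : Int :=
  let c := candidate.toList
  let t := target.toList
  ((PySem.List.pyRange 0 ((c.length : Int) - (t.length : Int) + 1) 1).foldl
    (fun (minDist : Option Int) i =>
      let distance := hamming_py (PySem.List.slice c (some i) (some (i + (t.length : Int)))) t
      match minDist with
      | none => some distance
      | some m => if distance < m then some distance else some m)
    none).getD 0

-- ===== PORT B =====
def get_substring_hamming_distance_py_alt (candidate : String) (target : String) : Int :=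
  let c := candidate.toList
  let t := target.toList
  let numWindows : Nat := ((c.length : Int) - (t.length : Int) + 1).toNat
  let distances : List Int := List.replicate numWindows 0
  let final := (PySem.List.pyRange 0 (t.length : Int) 1).foldl
    (fun ds k =>
      let tk := PySem.Chars.lower [PySem.List.pyGetD t k ' ']
      (PySem.List.enumerate ds 0).map
        (fun p => p.2 + (if PySem.Chars.lower [PySem.List.pyGetD c (p.1 + k) ' '] ≠ tk then 1 else 0)))
    distances
  (PySem.List.min? final (fun x => x)).getD 0

-- ===== PRECONDITION & SPEC =====
-- Pre_ excludes exactly the inputs on which A's two asserts fail (AssertionError):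
-- target longer than candidate, or empty candidate.
def Pre_get_substring_hamming_distance_py (candidate : String) (target : String) : Prop :=
  target.length ≤ candidate.length ∧ candidate.length ≠ 0
instance (candidate : String) (target : String) : Decidable (Pre_get_substring_hamming_distance_py candidate target) := by unfold Pre_get_substring_hamming_distance_py; infer_instance

def pvWitness_get_substring_hamming_distance_py : String × String := ("aBc", "b")

def Spec_get_substring_hamming_distance_py (candidate : String) (target : String) (out : Int) : Prop := out = get_substring_hamming_distance_py_alt candidate target
instance (candidate : String) (target : String) (out : Int) : Decidable (Spec_get_substring_hamming_distance_py candidate target out) := by unfold Spec_get_substring_hamming_distance_py; infer_instance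

-- ===== CLAIM (what is proved, stated in full; the proofs are below) =====
def Claim_equal_get_substring_hamming_distance_py : Prop := ∀ (candidate : String) (target : String), Dom_get_substring_hamming_distance_py candidate target → Pre_get_substring_hamming_distance_py candidate target → Spec_get_substring_hamming_distance_py candidate target (get_substring_hamming_distance_py candidate target)

-- ===== LEMMAS AND PROOFS =====

def pvInd (c t : List Char) (i k : Nat) : Int :=
  if PySem.Chars.lower [PySem.List.pyGetD c ((i : Int) + (k : Int)) ' ']
       ≠ PySem.Chars.lower [PySem.List.pyGetD t (k : Int) ' '] then 1 else 0

def pvPsum (c t : List Char) (i j : Nat) : Int := ((List.range j).map (pvInd c t i)).sum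

theorem pvPsum_succ (c t : List Char) (i j : Nat) :
    pvPsum c t i (j + 1) = pvPsum c t i j + pvInd c t i j := by
  simp [pvPsum, List.range_succ]

-- countP of a zip as an index sum

theorem pv_countP_zip (p : Char → Char → Bool) :
    ∀ (b a : List Char), a.length = b.length →
      ((a.zip b).countP (fun q => p q.1 q.2) : Int)
        = ((List.range b.length).map
            (fun k => if p (a.getD k ' ') (b.getD k ' ') = true then (1:Int) else 0)).sum := by
  intro b
  induction b with
  | nil => intro a h; simp at h; simp [h]
  | cons y b' ih =>
    intro a h
    cases a with
    | nil => simp at h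
    | cons x a' =>
      simp only [List.length_cons] at h
      have h' : a'.length = b'.length := by omega
      simp only [List.zip_cons_cons, List.countP_cons, List.length_cons,
        List.range_succ_eq_map, List.map_cons, List.map_map, List.sum_cons]
      push_cast
      rw [ih a' h']
      simp only [List.getD_cons_zero]
      have hmap : (List.map ((fun k => if p ((x :: a').getD k ' ') ((y :: b').getD k ' ') = true then (1:Int) else 0) ∘ Nat.succ) (List.range b'.length))
          = List.map (fun k => if p (a'.getD k ' ') (b'.getD k ' ') = true then (1:Int) else 0) (List.range b'.length) := by
        apply List.map_congr_left
        intro k _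
        simp [Function.comp]
      rw [hmap]
      ring

theorem pv_window_dist (c t : List Char) (i : Nat) (h : i + t.length ≤ c.length) :
    hamming_py (PySem.List.slice c (some (i:Int)) (some ((i:Int) + (t.length:Int)))) t
      = pvPsum c t i t.length := by
  rw [PySem.List.slice_natCast_add]
  set a := (c.drop i).take t.length with ha
  have hlen : a.length = t.length := by
    simp [ha, List.length_take, List.length_drop]; omega
  unfold hamming_py
  rw [PySem.List.foldl_ite_add_one (fun q : Char × Char => PySem.Chars.lower [q.1] ≠ PySem.Chars.lower [q.2])]
  rw [pv_countP_zip (fun x y => decide (PySem.Chars.lower [x] ≠ PySem.Chars.lower [y])) t a hlen]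
  simp only [zero_add, pvPsum]
  apply congrArg
  apply List.map_congr_left
  intro k hk
  rw [List.mem_range] at hk
  have hget : a.getD k ' ' = c.getD (i + k) ' ' := by
    simp only [List.getD_eq_getElem?_getD, ha]
    rw [List.getElem?_take, if_pos hk, List.getElem?_drop]
  have hc : PySem.List.pyGetD c ((i:Int) + (k:Int)) ' ' = c.getD (i+k) ' ' := by
    rw [show ((i:Int) + (k:Int)) = ((i+k : Nat) : Int) by push_cast; ring, PySem.List.pyGetD_natCast]
  have ht : PySem.List.pyGetD t ((k:Int)) ' ' = t.getD k ' ' := PySem.List.pyGetD_natCast t k ' '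
  simp only [pvInd, hc, ht, hget, decide_eq_true_eq]

theorem pv_inv (c t : List Char) (nw : Nat) : ∀ j : Nat,
    (PySem.List.pyRange 0 (j:Int) 1).foldl
      (fun ds k =>
        let tk := PySem.Chars.lower [PySem.List.pyGetD t k ' ']
        (PySem.List.enumerate ds 0).map
          (fun p => p.2 + (if PySem.Chars.lower [PySem.List.pyGetD c (p.1 + k) ' '] ≠ tk then 1 else 0)))
      (List.replicate nw 0)
      = (List.range nw).map (fun i => pvPsum c t i j) := by
  intro j
  induction j with
  | zero =>
    rw [show ((0:Nat):Int) = 0 from rfl, PySem.List.pyRange_one_eq_nil (le_refl 0)]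
    simp [pvPsum, List.map_const']
  | succ j ih =>
    rw [show ((j+1 : Nat) : Int) = (j:Int) + 1 by push_cast; ring,
      PySem.List.pyRange_one_succ_right (by positivity : (0:Int) ≤ (j:Int)),
      List.foldl_append, ih]
    simp only [List.foldl_cons, List.foldl_nil]
    apply List.ext_getElem
    · simp [PySem.List.length_enumerate]
    · intro i h1 h2
      simp only [List.getElem_map, PySem.List.getElem_enumerate, List.getElem_range,
        PySem.List.length_enumerate, List.length_map, List.length_range] at h1 h2 ⊢
      rw [pvPsum_succ]
      simp [pvInd]

theorem pv_optfold {α : Type} (f : α → Int) : ∀ (l : List α) (x : Int),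
    l.foldl (fun acc k => match acc with
      | none => some (f k)
      | some m => if f k < m then some (f k) else some m) (some x)
      = some (l.foldl (fun m k => min m (f k)) x) := by
  intro l
  induction l with
  | nil => intro x; rfl
  | cons y l ih =>
    intro x
    simp only [List.foldl_cons]
    have h : (if f y < x then some (f y) else some x) = some (min x (f y)) := by
      by_cases h : f y < x
      · rw [if_pos h, min_eq_right h.le]
      · rw [if_neg h, min_eq_left (not_lt.mp h)]
    rw [h, ih]

theorem pv_main (candidate target : String)
    (hm : target.toList.length ≤ candidate.toList.length) :
    get_substring_hamming_distance_py candidate target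
      = get_substring_hamming_distance_py_alt candidate target := by
  unfold get_substring_hamming_distance_py get_substring_hamming_distance_py_alt
  dsimp only
  set c := candidate.toList with hcdef
  set t := target.toList with htdef
  set n := c.length with hndef
  set m := t.length with hmdef
  set nw := n - m + 1 with hnwdef
  -- the common per-window distance
  set f : Nat → Int := fun k => pvPsum c t k m with hfdef
  -- A side
  have hbound : ((n:Int) - (m:Int) + 1) = ((nw : Nat) : Int) := by omega
  rw [hbound, PySem.List.pyRange_one]
  have htn : (((nw:Nat):Int) - 0).toNat = nw := by omega
  rw [htn, List.foldl_map]
  have hcongr : ∀ (acc : Option Int) (k : Nat), k ∈ List.range nw →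
      (fun (x : Option Int) (y : Nat) =>
        match x with
        | none => some (hamming_py (PySem.List.slice c (some (0 + (y:Int))) (some (0 + (y:Int) + (m:Int)))) t)
        | some m_1 =>
          if hamming_py (PySem.List.slice c (some (0 + (y:Int))) (some (0 + (y:Int) + (m:Int)))) t < m_1 then
            some (hamming_py (PySem.List.slice c (some (0 + (y:Int))) (some (0 + (y:Int) + (m:Int)))) t)
          else some m_1) acc k =
      (fun (acc : Option Int) (k : Nat) => match acc with
        | none => some (f k)
        | some mm => if f k < mm then some (f k) else some mm) acc k := by
    intro acc k hk
    rw [List.mem_range] at hk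
    have hk' : k + m ≤ n := by omega
    have hd : hamming_py (PySem.List.slice c (some ((k:Int))) (some ((k:Int) + (m : Int)))) t = f k :=
      pv_window_dist c t k hk'
    cases acc <;> simp [hd]
  rw [PySem.List.foldl_congr_mem _ _ _ _ hcongr]
  -- B side
  rw [Int.toNat_natCast, pv_inv c t nw m]
  -- both sides over range nw = 0 :: succs
  rw [show nw = (n - m) + 1 from hnwdef, List.range_succ_eq_map, List.map_cons,
    PySem.List.min?_id_cons, List.foldl_cons]
  have hfirst : (match (none : Option Int) with
      | none => some (f 0)
      | some mm => if f 0 < mm then some (f 0) else some mm) = some (f 0) := rfl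
  rw [hfirst, pv_optfold f]
  simp [List.foldl_map, hfdef]

-- ===== VERDICT (by name: the statement is the Claim_ definition above) =====
theorem get_substring_hamming_distance_py_spec : Claim_equal_get_substring_hamming_distance_py := by
  intro candidate target _ hpre
  unfold Spec_get_substring_hamming_distance_py
  exact pv_main candidate target (by simpa using hpre.1)
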